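-- pv_equiv track=rewrite | github.com/galid1/Algorithm | python/exams/21.11.06(wooatech)/7.py | solution
-- ===== SOURCE A (Python) =====
-- def solution(grid, clockwise):
--     answer = []
--     n = len(grid)
--
--     if clockwise:
--         for stair in range(n - 1, -1, -1):
--             s = ''
--             idx = 0
--
--             for i in range(n - stair):
--                 while idx <= i*2:
--                     s += grid[stair+i][idx]
--                     idx += 1
--             answer.append(s[-1::-1])
--
--     else:
--         for stair in range(n-1, -1, -1):
--             s = ''
--             idx = -1
--
--             for i in range(n - stair):
--                 while idx >= i * -2 - 1:
--                     s += grid[stair+i][idx]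
--                     idx -= 1
--             answer.append(s)
--
--     return answer
--
-- grid = ["A","MAN","DRINK","WATER11"]
--
-- clockwise = False
-- ===== SOURCE B (Python) =====
-- def solution(grid, clockwise):
--     n = len(grid)
--     answer = []
--     for stair in range(n - 1, -1, -1):
--         chars = []
--         if clockwise:
--             # build the reversed string directly: walk the rows bottom-up
--             for i in range(n - stair - 1, 0, -1):
--                 row = grid[stair + i]
--                 chars.append(row[2 * i])
--                 chars.append(row[2 * i - 1])
--             chars.append(grid[stair][0])
--         else:
--             for i in range(n - stair):
--                 row = grid[stair + i]
--                 if i == 0: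
--                     chars.append(row[-1])
--                 else:
--                     chars.append(row[-2 * i])
--                     chars.append(row[-2 * i - 1])
--         answer.append(''.join(chars))
--     return answer
-- ===== Notes on version B (the rewrite author's own statement) =====
-- stated objective: simpler
-- what changed: B removes A's cross-iteration running cursor `idx` and the inner while-loop: each character is read at a directly computed column (clockwise rows are walked bottom-up so no final string reversal is needed), with the result joined per stair.
import Mathlib
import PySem

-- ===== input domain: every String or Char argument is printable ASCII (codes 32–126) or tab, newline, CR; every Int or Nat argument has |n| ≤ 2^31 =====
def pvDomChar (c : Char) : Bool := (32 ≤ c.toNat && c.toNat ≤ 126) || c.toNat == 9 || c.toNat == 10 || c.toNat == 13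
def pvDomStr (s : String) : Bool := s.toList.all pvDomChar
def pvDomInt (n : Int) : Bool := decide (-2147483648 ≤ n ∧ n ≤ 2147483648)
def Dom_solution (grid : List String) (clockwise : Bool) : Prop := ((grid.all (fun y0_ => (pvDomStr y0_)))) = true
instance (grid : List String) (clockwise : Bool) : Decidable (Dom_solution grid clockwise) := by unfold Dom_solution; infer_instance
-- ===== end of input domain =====

-- B drops A's persistent `idx` cursor and inner `while`, reading each character at a
-- directly computed column; objective: simpler (no cross-iteration state), not faster.

-- ===== PORT A =====
-- inner `while idx <= bound: s += row[idx]; idx += 1` (out-of-range reads default to ' ';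
-- Pre_solution excludes exactly the inputs where Python would hit one and raise IndexError)
def aWhileUp (row : String) (bound : Int) (s : List Char) (idx : Int) : List Char × Int :=
  if h : idx ≤ bound then
    aWhileUp row bound (s ++ [(PySem.Str.pyGet? row idx).getD ' ']) (idx + 1)
  else (s, idx)
termination_by (bound + 1 - idx).toNat
decreasing_by omega

-- inner `while idx >= bound: s += row[idx]; idx -= 1`
def aWhileDown (row : String) (bound : Int) (s : List Char) (idx : Int) : List Char × Int :=
  if h : bound ≤ idx then
    aWhileDown row bound (s ++ [(PySem.Str.pyGet? row idx).getD ' ']) (idx - 1)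
  else (s, idx)
termination_by (idx + 1 - bound).toNat
decreasing_by omega

def solution (grid : List String) (clockwise : Bool) : List String :=
  let n : Int := grid.length
  if clockwise then
    (PySem.List.pyRange (n - 1) (-1) (-1)).map (fun stair =>
      let p := (PySem.List.pyRange 0 (n - stair) 1).foldl
        (fun (p : List Char × Int) i =>
          aWhileUp ((PySem.List.pyGet? grid (stair + i)).getD "") (i * 2) p.1 p.2)
        ([], 0)
      -- s[-1::-1]
      String.ofList ((PySem.List.slice? p.1 (some (-1)) none (-1)).getD []))
  else
    (PySem.List.pyRange (n - 1) (-1) (-1)).map (fun stair =>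
      let p := (PySem.List.pyRange 0 (n - stair) 1).foldl
        (fun (p : List Char × Int) i =>
          aWhileDown ((PySem.List.pyGet? grid (stair + i)).getD "") (i * (-2) - 1) p.1 p.2)
        ([], -1)
      String.ofList p.1)

-- ===== PORT B =====
def solution_alt (grid : List String) (clockwise : Bool) : List String :=
  let n : Int := grid.length
  (PySem.List.pyRange (n - 1) (-1) (-1)).map (fun stair =>
    let chars : List Char :=
      if clockwise then
        ((PySem.List.pyRange (n - stair - 1) 0 (-1)).flatMap (fun i =>
          let row := (PySem.List.pyGet? grid (stair + i)).getD ""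
          [(PySem.Str.pyGet? row (2 * i)).getD ' ',
           (PySem.Str.pyGet? row (2 * i - 1)).getD ' ']))
        ++ [(PySem.Str.pyGet? ((PySem.List.pyGet? grid stair).getD "") 0).getD ' ']
      else
        (PySem.List.pyRange 0 (n - stair) 1).flatMap (fun i =>
          let row := (PySem.List.pyGet? grid (stair + i)).getD ""
          if i = 0 then [(PySem.Str.pyGet? row (-1)).getD ' ']
          else [(PySem.Str.pyGet? row (-2 * i)).getD ' ',
                (PySem.Str.pyGet? row (-2 * i - 1)).getD ' '])
    String.ofList chars)

-- ===== PRECONDITION & SPEC =====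
-- exactly the inputs on which Python A returns: row r must have at least 2r+1 characters
-- (the stair=0 pass reads columns ±(2r) of row r; anything shorter raises IndexError)
def Pre_solution (grid : List String) (clockwise : Bool) : Prop :=
  ∀ r < grid.length, 2 * r + 1 ≤ (grid.getD r "").length
instance (grid : List String) (clockwise : Bool) : Decidable (Pre_solution grid clockwise) := by
  unfold Pre_solution; infer_instance
def pvWitness_solution : List String × Bool := (["A", "MAN", "DRINK", "WATER11"], false)

def Spec_solution (grid : List String) (clockwise : Bool) (out : List String) : Prop := out = solution_alt grid clockwise
instance (grid : List String) (clockwise : Bool) (out : List String) : Decidable (Spec_solution grid clockwise out) := by unfold Spec_solution; infer_instance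

-- ===== CLAIM (what is proved, stated in full; the proofs are below) =====
def Claim_equal_solution : Prop := ∀ (grid : List String) (clockwise : Bool), Dom_solution grid clockwise → Pre_solution grid clockwise → Spec_solution grid clockwise (solution grid clockwise)

-- ===== LEMMAS AND PROOFS =====

-- character at column j of row stair+i (proof-side abbreviation of the ports' read)
def chS (grid : List String) (stair i j : Int) : Char :=
  (PySem.Str.pyGet? ((PySem.List.pyGet? grid (stair + i)).getD "") j).getD ' '

theorem aWhileUp_stop (row : String) (bound : Int) (s : List Char) (idx : Int)
    (h : bound < idx) : aWhileUp row bound s idx = (s, idx) := by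
  rw [aWhileUp]; simp [not_le.mpr h]

theorem aWhileUp_run (row : String) (bound : Int) :
    ∀ (k : Nat) (s : List Char) (idx : Int), (bound + 1 - idx).toNat = k → idx ≤ bound + 1 →
    aWhileUp row bound s idx =
      (s ++ (PySem.List.pyRange idx (bound + 1) 1).map
          (fun j => (PySem.Str.pyGet? row j).getD ' '), bound + 1) := by
  intro k
  induction k with
  | zero =>
    intro s idx hk hle
    have : idx = bound + 1 := by omega
    subst this
    rw [aWhileUp_stop row bound s _ (by omega)]
    simp [PySem.List.pyRange_one_eq_nil (by omega : bound + 1 ≤ bound + 1)]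
  | succ k ih =>
    intro s idx hk hle
    have hlt : idx ≤ bound := by omega
    rw [aWhileUp]
    simp only [hlt, dif_pos]
    rw [ih _ (idx + 1) (by omega) (by omega)]
    rw [PySem.List.pyRange_one_cons (by omega : idx < bound + 1)]
    simp

theorem aWhileDown_stop (row : String) (bound : Int) (s : List Char) (idx : Int)
    (h : idx < bound) : aWhileDown row bound s idx = (s, idx) := by
  rw [aWhileDown]; simp [not_le.mpr h]

theorem aWhileDown_run (row : String) (bound : Int) :
    ∀ (k : Nat) (s : List Char) (idx : Int), (idx + 1 - bound).toNat = k → bound - 1 ≤ idx →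
    aWhileDown row bound s idx =
      (s ++ (PySem.List.pyRange idx (bound - 1) (-1)).map
          (fun j => (PySem.Str.pyGet? row j).getD ' '), bound - 1) := by
  intro k
  induction k with
  | zero =>
    intro s idx hk hle
    have : idx = bound - 1 := by omega
    subst this
    rw [aWhileDown_stop row bound s _ (by omega)]
    simp [PySem.List.pyRange_neg_one_eq_nil (by omega : bound - 1 ≤ bound - 1)]
  | succ k ih =>
    intro s idx hk hle
    have hge : bound ≤ idx := by omega
    rw [aWhileDown]
    simp only [hge, dif_pos]
    rw [ih _ (idx - 1) (by omega) (by omega)]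
    rw [PySem.List.pyRange_neg_one_cons (by omega : bound - 1 < idx)]
    simp

theorem foldCW (grid : List String) (stair : Int) :
    ∀ (m : Nat), 1 ≤ m →
    (PySem.List.pyRange 0 (m : Int) 1).foldl
      (fun (p : List Char × Int) i =>
        aWhileUp ((PySem.List.pyGet? grid (stair + i)).getD "") (i * 2) p.1 p.2)
      ([], 0)
    = (chS grid stair 0 0 ::
        (PySem.List.pyRange 1 (m : Int) 1).flatMap
          (fun i => [chS grid stair i (2 * i - 1), chS grid stair i (2 * i)]),
       2 * (m : Int) - 1) := by
  intro m
  induction m with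
  | zero => intro h; omega
  | succ m ih =>
    intro _
    by_cases hm : m = 0
    · subst hm
      rw [show ((1:Nat):Int) = 0 + 1 by norm_num, PySem.List.pyRange_one_succ_right (by omega)]
      rw [PySem.List.pyRange_one_eq_nil (by omega : (0:Int) ≤ 0)]
      simp only [List.nil_append, List.foldl_cons, List.foldl_nil]
      rw [aWhileUp_run _ _ ((0 * 2 + 1 - 0 : Int)).toNat [] 0 rfl (by omega)]
      rw [PySem.List.pyRange_one_cons (by omega : (0:Int) < 0 * 2 + 1)]
      rw [PySem.List.pyRange_one_eq_nil (by omega : (0:Int) * 2 + 1 ≤ 0 + 1)]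
      rw [PySem.List.pyRange_one_eq_nil (by omega : (0:Int) + 1 ≤ 1)]
      simp [chS]
    · have hm1 : 1 ≤ m := by omega
      have hcast : ((m + 1 : Nat) : Int) = (m : Int) + 1 := by push_cast; ring
      rw [hcast, PySem.List.pyRange_one_succ_right (by omega : (0:Int) ≤ (m:Int)),
          PySem.List.pyRange_one_succ_right (by omega : (1:Int) ≤ (m:Int))]
      rw [List.foldl_append, ih hm1]
      simp only [List.foldl_cons, List.foldl_nil]
      rw [aWhileUp_run _ _ ((m:Int) * 2 + 1 - (2 * (m:Int) - 1)).toNat _ _ rfl (by omega)]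
      rw [PySem.List.pyRange_one_cons (by omega : 2 * (m:Int) - 1 < (m:Int) * 2 + 1),
          PySem.List.pyRange_one_cons (by omega : 2 * (m:Int) - 1 + 1 < (m:Int) * 2 + 1),
          PySem.List.pyRange_one_eq_nil (by omega : (m:Int) * 2 + 1 ≤ 2 * (m:Int) - 1 + 1 + 1)]
      simp only [Prod.mk.injEq]
      refine ⟨?_, by omega⟩
      simp only [List.flatMap_append, List.flatMap_cons, List.flatMap_nil,
        List.append_nil, List.map_cons, List.map_nil, List.cons_append]
      simp [chS]

theorem foldCCW (grid : List String) (stair : Int) :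
    ∀ (m : Nat), 1 ≤ m →
    (PySem.List.pyRange 0 (m : Int) 1).foldl
      (fun (p : List Char × Int) i =>
        aWhileDown ((PySem.List.pyGet? grid (stair + i)).getD "") (i * (-2) - 1) p.1 p.2)
      ([], -1)
    = (chS grid stair 0 (-1) ::
        (PySem.List.pyRange 1 (m : Int) 1).flatMap
          (fun i => [chS grid stair i (-2 * i), chS grid stair i (-2 * i - 1)]),
       -2 * (m : Int)) := by
  intro m
  induction m with
  | zero => intro h; omega
  | succ m ih =>
    intro _
    by_cases hm : m = 0
    · subst hm
      rw [show ((1:Nat):Int) = 0 + 1 by norm_num, PySem.List.pyRange_one_succ_right (by omega)]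
      rw [PySem.List.pyRange_one_eq_nil (by omega : (0:Int) ≤ 0)]
      simp only [List.nil_append, List.foldl_cons, List.foldl_nil]
      rw [aWhileDown_run _ _ (((-1) + 1 - (0 * (-2) - 1) : Int)).toNat [] (-1) rfl (by omega)]
      rw [PySem.List.pyRange_neg_one_cons (by omega : 0 * (-2) - 1 - 1 < (-1:Int))]
      rw [PySem.List.pyRange_neg_one_eq_nil (by omega : (-1:Int) - 1 ≤ 0 * (-2) - 1 - 1)]
      rw [PySem.List.pyRange_one_eq_nil (by omega : (0:Int) + 1 ≤ 1)]
      simp [chS]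
    · have hm1 : 1 ≤ m := by omega
      have hcast : ((m + 1 : Nat) : Int) = (m : Int) + 1 := by push_cast; ring
      rw [hcast, PySem.List.pyRange_one_succ_right (by omega : (0:Int) ≤ (m:Int)),
          PySem.List.pyRange_one_succ_right (by omega : (1:Int) ≤ (m:Int))]
      rw [List.foldl_append, ih hm1]
      simp only [List.foldl_cons, List.foldl_nil]
      rw [aWhileDown_run _ _ ((-2 * (m:Int)) + 1 - ((m:Int) * (-2) - 1)).toNat _ _ rfl (by omega)]
      rw [PySem.List.pyRange_neg_one_cons (by omega : (m:Int) * (-2) - 1 - 1 < -2 * (m:Int)),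
          PySem.List.pyRange_neg_one_cons (by omega : (m:Int) * (-2) - 1 - 1 < -2 * (m:Int) - 1),
          PySem.List.pyRange_neg_one_eq_nil (by omega : -2 * (m:Int) - 1 - 1 ≤ (m:Int) * (-2) - 1 - 1)]
      simp only [Prod.mk.injEq]
      refine ⟨?_, by omega⟩
      simp only [List.flatMap_append, List.flatMap_cons, List.flatMap_nil,
        List.append_nil, List.map_cons, List.map_nil, List.cons_append]
      simp [chS]

theorem slice_neg_one_rev (cs : List Char) :
    PySem.List.slice? cs (some (-1)) none (-1) = some cs.reverse := by
  cases cs with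
  | nil => decide
  | cons c cs =>
    have h : PySem.List.sliceIndices (c :: cs).length (some (-1)) none (-1)
           = PySem.List.sliceIndices (c :: cs).length none none (-1) := by
      simp [PySem.List.sliceIndices]
    have h2 := PySem.List.slice?_none_none_neg_one (c :: cs)
    simp only [PySem.List.slice?, h] at h2 ⊢
    exact h2

theorem flatMap_congr_mem {α β : Type} {l : List α} {f g : α → List β}
    (h : ∀ a ∈ l, f a = g a) : l.flatMap f = l.flatMap g := by
  induction l with
  | nil => rfl
  | cons x xs ih =>
    simp only [List.flatMap_cons]
    rw [h x (by simp), ih (fun a ha => h a (by simp [ha]))]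

theorem main_eq (grid : List String) (clockwise : Bool) :
    solution grid clockwise = solution_alt grid clockwise := by
  cases clockwise with
  | false =>
    simp only [solution, solution_alt, Bool.false_eq_true, if_false]
    apply List.map_congr_left
    intro stair hst
    rw [PySem.List.mem_pyRange_neg_one] at hst
    obtain ⟨h1, h2⟩ := hst
    have hm : 1 ≤ ((grid.length : Int) - stair).toNat := by omega
    have hmi : ((((grid.length : Int) - stair).toNat : Int)) = (grid.length : Int) - stair := by omega
    rw [← hmi, foldCCW grid stair _ hm]
    congr 1
    rw [PySem.List.pyRange_one_cons (by omega : (0:Int) < (((grid.length : Int) - stair).toNat : Int))]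
    simp only [List.flatMap_cons]
    congr 1
    apply flatMap_congr_mem
    intro i hi
    rw [PySem.List.mem_pyRange_one] at hi
    rw [if_neg (by omega : ¬ i = 0)]
    simp [chS]
  | true =>
    simp only [solution, solution_alt, if_true]
    apply List.map_congr_left
    intro stair hst
    rw [PySem.List.mem_pyRange_neg_one] at hst
    obtain ⟨h1, h2⟩ := hst
    have hm : 1 ≤ ((grid.length : Int) - stair).toNat := by omega
    have hmi : ((((grid.length : Int) - stair).toNat : Int)) = (grid.length : Int) - stair := by omega
    rw [← hmi, foldCW grid stair _ hm]
    rw [slice_neg_one_rev]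
    simp only [Option.getD_some]
    congr 1
    rw [List.reverse_cons, List.reverse_flatMap]
    have hrange : PySem.List.pyRange ((((grid.length : Int) - stair).toNat : Int) - 1) 0 (-1)
        = (PySem.List.pyRange 1 (((grid.length : Int) - stair).toNat : Int) 1).reverse := by
      rw [PySem.List.pyRange_neg_one_eq_reverse]
      norm_num
    rw [hrange]
    congr 1
    all_goals simp [chS]

-- ===== VERDICT (by name: the statement is the Claim_ definition above) =====
theorem solution_spec : Claim_equal_solution := by
  intro grid clockwise _ _
  exact main_eq grid clockwise
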